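-- pv_equiv track=rewrite | github.com/lecarrera-tec/CoronaTec | parserPPP.py | derechaIgual
-- ===== SOURCE A (Python) =====
-- from typing import Any, List, Dict
--
-- def derechaIgual(expresion: str, izq: str) -> str:
--     """Extrae el expresión a la derecha de un igual.
--
--     Argumentos
--     ----------
--     expresion:
--         Texto que puede estar formado por varios iguales separados por
--         comas. Se busca el igual con el respectivo lado izquierdo.
--     izq:
--         Expresión a buscar al lado izquierda del igual.
--
--     Devuelve
--     --------
--     El texto que esté al lado derecho del igual de la expresión
--     referida por ``izq``. Si la expresión no se encuentra, devuelve
--     un string vacío.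
--     """
--
--     # Separamos el expresion en cada una de las opciones.
--     lista: List[str] = expresion.split(',')
--
--     for elem in lista:
--         # Buscamos el igual para separar el string.
--         idx: int = elem.find('=')
--         # No tiene igual; seguimos con el siguiente elemento.
--         if idx == -1:
--             continue
--         # Extraemos el lado izquierdo.
--         temp: str = elem[0:idx].strip()
--         # Si el lado izquierdo no coincide, continuamos
--         if temp != izq:
--             continue
--         # El lado izquierdo coincide. Devolvemos lo que hay al lado
--         # derecho del igual.
--         temp = elem[idx+1:].strip()
--         return temp
--     # No se encontró nada.
--     return ''
-- ===== SOURCE B (Python) =====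
-- def derechaIgual(expresion: str, izq: str) -> str:
--     """Parse the whole expression into a first-wins table, then look up izq."""
--     tabla = {}
--     for elem in expresion.split(','):
--         lado_izq, sep, lado_der = elem.partition('=')
--         if sep:
--             tabla.setdefault(lado_izq.strip(), lado_der.strip())
--     return tabla.get(izq, '')
-- ===== Notes on version B (the rewrite author's own statement) =====
-- stated objective: idiomatic
-- what changed: Replaces the early-returning scan over comma-separated pieces by a parse-into-table-then-lookup decomposition: all 'left=right' pairs are collected into a dict with setdefault (first occurrence wins) and the answer is a single dict.get.
import Mathlib
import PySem

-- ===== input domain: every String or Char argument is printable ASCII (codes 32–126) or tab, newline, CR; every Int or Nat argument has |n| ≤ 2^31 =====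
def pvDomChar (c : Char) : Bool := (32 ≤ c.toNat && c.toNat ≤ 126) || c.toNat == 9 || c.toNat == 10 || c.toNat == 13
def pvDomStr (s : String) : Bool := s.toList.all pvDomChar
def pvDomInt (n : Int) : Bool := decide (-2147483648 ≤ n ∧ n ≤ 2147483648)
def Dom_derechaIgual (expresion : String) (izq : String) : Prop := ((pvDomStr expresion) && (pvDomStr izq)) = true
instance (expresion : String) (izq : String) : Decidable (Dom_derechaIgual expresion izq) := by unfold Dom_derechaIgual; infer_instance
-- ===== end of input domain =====

-- B replaces A's early-returning scan by a parse-into-table-then-lookup decomposition (idiomatic, same cost).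

-- ===== PORT A =====
-- the for-loop over the pieces of expresion.split(',') with its two 'continue's and early return
def derechaIgualLoop (izq : String) : List String → String
  | [] => ""
  | elem :: rest =>
    let idx : Int := PySem.Str.find elem "="
    if idx = -1 then derechaIgualLoop izq rest
    else
      let temp := PySem.Str.strip (PySem.Str.slice elem (some 0) (some idx))
      if temp ≠ izq then derechaIgualLoop izq rest
      else PySem.Str.strip (PySem.Str.slice elem (some (idx + 1)) none)

def derechaIgual (expresion : String) (izq : String) : String :=
  derechaIgualLoop izq ((PySem.Str.split? expresion ",").getD [])

-- ===== PORT B =====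
-- elem.partition('='): hand port (first '=' via find, then the two slices) — exact: partition splits at the first occurrence
def pvPartitionEq (elem : String) : String × String × String :=
  let i : Int := PySem.Str.find elem "="
  if i = -1 then (elem, "", "")
  else (PySem.Str.slice elem (some 0) (some i), "=",
        PySem.Str.slice elem (some (i + 1)) none)

-- the table-building loop: setdefault keeps the FIRST occurrence of each left side
def pvTabla (parts : List String) : PySem.Dict String String :=
  parts.foldl (fun d elem =>
    let p := pvPartitionEq elem
    if p.2.1 ≠ "" then d.setdefault (PySem.Str.strip p.1) (PySem.Str.strip p.2.2) else d)
    PySem.Dict.empty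

def derechaIgual_alt (expresion : String) (izq : String) : String :=
  (pvTabla ((PySem.Str.split? expresion ",").getD [])).getD izq ""

-- ===== PRECONDITION & SPEC =====
def Spec_derechaIgual (expresion : String) (izq : String) (out : String) : Prop := out = derechaIgual_alt expresion izq
instance (expresion : String) (izq : String) (out : String) : Decidable (Spec_derechaIgual expresion izq out) := by unfold Spec_derechaIgual; infer_instance

-- ===== CLAIM (what is proved, stated in full; the proofs are below) =====
def Claim_equal_derechaIgual : Prop := ∀ (expresion : String) (izq : String), Dom_derechaIgual expresion izq → Spec_derechaIgual expresion izq (derechaIgual expresion izq)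

-- ===== LEMMAS AND PROOFS =====

-- setdefault restated through insert (on a fresh key, insert appends — items_insert_of_not_contains)
theorem pvSetdefault_eq {κ ν : Type} [BEq κ] [LawfulBEq κ] (d : PySem.Dict κ ν) (k : κ) (v : ν) :
    d.setdefault k v = if d.contains k then d else d.insert k v := by
  by_cases h : d.contains k
  · simp [PySem.Dict.setdefault, h]
  · have h' : d.contains k = false := eq_false_of_ne_true h
    apply PySem.Dict.ext
    simp [PySem.Dict.setdefault, h', PySem.Dict.items_insert_of_not_contains d v h']

-- one table-building step versus one step of A's scan, with the pair (L, R) abstracted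
theorem pvStep (d : PySem.Dict String String) (L R izq X : String) :
    (if (d.setdefault L R).contains izq then (d.setdefault L R).getD izq "" else X)
      = if d.contains izq then d.getD izq "" else if L = izq then R else X := by
  rw [pvSetdefault_eq]
  by_cases hL : d.contains L = true
  · rw [if_pos hL]
    by_cases hiz : L = izq
    · subst hiz; simp [hL]
    · by_cases hdz : d.contains izq = true <;> simp [hdz, hiz]
  · rw [if_neg hL]
    by_cases hiz : L = izq
    · subst hiz
      simp [PySem.Dict.getD_insert_self, eq_false_of_ne_true hL]
    · rw [PySem.Dict.contains_insert, PySem.Dict.getD_insert_of_ne d R "" (Ne.symm hiz)]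
      simp [Ne.symm hiz, hiz]

-- loop invariant: looking up izq in the table built from `parts` on top of `d` gives
-- d's binding if izq is already bound, else the first match of A's scan over `parts`
theorem pvTabla_loop_eq (izq : String) (parts : List String) (d : PySem.Dict String String) :
    (parts.foldl (fun d elem =>
        let p := pvPartitionEq elem
        if p.2.1 ≠ "" then d.setdefault (PySem.Str.strip p.1) (PySem.Str.strip p.2.2) else d) d).getD izq ""
      = if d.contains izq then d.getD izq "" else derechaIgualLoop izq parts := by
  induction parts generalizing d with
  | nil =>
    simp only [List.foldl_nil, derechaIgualLoop]
    by_cases h : d.contains izq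
    · simp [h]
    · simp [h, PySem.Dict.getD_of_not_contains d "" (eq_false_of_ne_true h)]
  | cons elem rest ih =>
    simp only [List.foldl_cons]
    rw [ih]
    simp only [pvPartitionEq, derechaIgualLoop, PySem.Str.find_eq,
      show ("=" : String).toList = ['='] from rfl, ne_eq, ite_not]
    generalize PySem.Chars.find elem.toList ['='] = k
    by_cases hfind : k = -1
    · simp [hfind]
    · simp only [if_neg hfind]
      simp only [if_neg (show ¬("=" : String) = "" by decide)]
      rw [pvStep]

-- ===== VERDICT (by name: the statement is the Claim_ definition above) =====
theorem derechaIgual_spec : Claim_equal_derechaIgual := by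
  intro expresion izq _
  unfold Spec_derechaIgual derechaIgual derechaIgual_alt pvTabla
  rw [pvTabla_loop_eq]
  simp [PySem.Dict.contains_empty]
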